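-- pv_equiv track=rewrite | github.com/venux021/soda | works/zcy2/c9/q21.py | cal_asc
-- ===== SOURCE A (Python) =====
-- def cal_asc(arr, i1, i2, max_value):
--     if i1 > i2:
--         return 0
--     peek = arr[i2]
--     num_peek = 0
--     res = 1
--     cur = 1
--     for i in range(i1+1, i2+1):
--         if arr[i] > arr[i-1]:
--             cur += 1
--         res += cur
--         if arr[i] == peek:
--             num_peek += 1
--
--     if max_value > cur:
--         res += num_peek * (max_value - cur)
--     return res
-- ===== SOURCE B (Python) =====
-- def cal_asc(arr, i1, i2, max_value):
--     if i1 > i2: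
--         return 0
--     # contribution form: an ascent at index j (arr[j] > arr[j-1]) raises A's running
--     # `cur` for every later position up to i2, contributing i2 - j + 1 to the total.
--     res = i2 - i1 + 1
--     asc = 0
--     for j in range(i1 + 1, i2 + 1):
--         if arr[j] > arr[j - 1]:
--             asc += 1
--             res += i2 - j + 1
--     cur = 1 + asc
--     peek = arr[i2]
--     num_peek = sum(1 for j in range(i1 + 1, i2 + 1) if arr[j] == peek)
--     if max_value > cur:
--         res += num_peek * (max_value - cur)
--     return res
-- ===== Notes on version B (the rewrite author's own statement) =====
-- stated objective: alternative
-- what changed: Replaces A's single stateful pass accumulating a running cur into res at every index by a contribution-counting form: res starts at the window length and each ascent at index j adds its closed-form contribution i2-j+1, with num_peek computed in a separate counting pass.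
import Mathlib
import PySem

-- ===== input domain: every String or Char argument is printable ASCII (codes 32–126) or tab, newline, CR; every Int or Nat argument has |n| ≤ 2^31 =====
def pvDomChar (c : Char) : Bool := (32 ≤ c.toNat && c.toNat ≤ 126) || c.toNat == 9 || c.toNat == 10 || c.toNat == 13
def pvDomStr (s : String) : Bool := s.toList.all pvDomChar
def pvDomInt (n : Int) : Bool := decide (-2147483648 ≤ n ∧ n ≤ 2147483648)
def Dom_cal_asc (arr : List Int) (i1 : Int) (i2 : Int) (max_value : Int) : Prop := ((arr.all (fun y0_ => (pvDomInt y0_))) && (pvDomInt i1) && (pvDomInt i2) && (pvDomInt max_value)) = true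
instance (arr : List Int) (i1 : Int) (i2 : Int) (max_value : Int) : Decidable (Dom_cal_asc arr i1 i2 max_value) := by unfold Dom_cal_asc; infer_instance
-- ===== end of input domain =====

-- B replaces A's stateful running-`cur` accumulation by a contribution-counting pass
-- (each ascent at j contributes i2-j+1) plus a separate counting pass for num_peek;
-- same cost, alternative decomposition.

-- ===== PORT A =====
def cal_asc (arr : List Int) (i1 : Int) (i2 : Int) (max_value : Int) : Int :=
  if i1 > i2 then 0
  else
    let peek := PySem.List.pyGetD arr i2 0
    let st := (PySem.List.pyRange (i1+1) (i2+1) 1).foldl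
      (fun (st : Int × Int × Int) i =>
        let cur := if PySem.List.pyGetD arr i 0 > PySem.List.pyGetD arr (i-1) 0
                   then st.2.2 + 1 else st.2.2
        let res := st.2.1 + cur
        let np := if PySem.List.pyGetD arr i 0 = peek then st.1 + 1 else st.1
        (np, res, cur)) ((0 : Int), (1 : Int), (1 : Int))
    if max_value > st.2.2 then st.2.1 + st.1 * (max_value - st.2.2) else st.2.1

-- ===== PORT B =====
def cal_asc_alt (arr : List Int) (i1 : Int) (i2 : Int) (max_value : Int) : Int :=
  if i1 > i2 then 0
  else
    let p := (PySem.List.pyRange (i1+1) (i2+1) 1).foldl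
      (fun (st : Int × Int) j =>
        if PySem.List.pyGetD arr j 0 > PySem.List.pyGetD arr (j-1) 0
        then (st.1 + (i2 - j + 1), st.2 + 1) else st)
      ((i2 - i1 + 1 : Int), (0 : Int))
    let cur := 1 + p.2
    let peek := PySem.List.pyGetD arr i2 0
    let num_peek := ((PySem.List.pyRange (i1+1) (i2+1) 1).map
        (fun j => if PySem.List.pyGetD arr j 0 = peek then (1 : Int) else 0)).sum
    if max_value > cur then p.1 + num_peek * (max_value - cur) else p.1

-- ===== PRECONDITION & SPEC =====
-- Pre_ excludes exactly the inputs where Python's cal_asc raises IndexError: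
-- when i1 ≤ i2 it indexes arr at every position of [i1, i2] (only i2 when i1 = i2).
def Pre_cal_asc (arr : List Int) (i1 : Int) (i2 : Int) (max_value : Int) : Prop :=
  i1 > i2 ∨ ((-(arr.length : Int) ≤ i1 ∨ i1 = i2) ∧ -(arr.length : Int) ≤ i2 ∧ i2 < (arr.length : Int))
instance (arr : List Int) (i1 : Int) (i2 : Int) (max_value : Int) : Decidable (Pre_cal_asc arr i1 i2 max_value) := by unfold Pre_cal_asc; infer_instance
def pvWitness_cal_asc : List Int × Int × Int × Int := ([1, 3, 2, 3], 0, 3, 5)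

def Spec_cal_asc (arr : List Int) (i1 : Int) (i2 : Int) (max_value : Int) (out : Int) : Prop := out = cal_asc_alt arr i1 i2 max_value
instance (arr : List Int) (i1 : Int) (i2 : Int) (max_value : Int) (out : Int) : Decidable (Spec_cal_asc arr i1 i2 max_value out) := by unfold Spec_cal_asc; infer_instance

-- ===== CLAIM (what is proved, stated in full; the proofs are below) =====
def Claim_equal_cal_asc : Prop := ∀ (arr : List Int) (i1 : Int) (i2 : Int) (max_value : Int), Dom_cal_asc arr i1 i2 max_value → Pre_cal_asc arr i1 i2 max_value → Spec_cal_asc arr i1 i2 max_value (cal_asc arr i1 i2 max_value)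

-- ===== LEMMAS AND PROOFS =====

-- B's fold is additive in its state.
lemma shiftB (arr : List Int) (i2 : Int) :
    ∀ (L : List Int) (r k : Int),
      L.foldl (fun (st : Int × Int) j =>
        if PySem.List.pyGetD arr j 0 > PySem.List.pyGetD arr (j-1) 0
        then (st.1 + (i2 - j + 1), st.2 + 1) else st) (r, k)
      = (r + (L.foldl (fun (st : Int × Int) j =>
          if PySem.List.pyGetD arr j 0 > PySem.List.pyGetD arr (j-1) 0
          then (st.1 + (i2 - j + 1), st.2 + 1) else st) (0, 0)).1,
         k + (L.foldl (fun (st : Int × Int) j =>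
          if PySem.List.pyGetD arr j 0 > PySem.List.pyGetD arr (j-1) 0
          then (st.1 + (i2 - j + 1), st.2 + 1) else st) (0, 0)).2) := by
  intro L
  induction L with
  | nil => intro r k; simp
  | cons a t ih =>
    intro r k
    simp only [List.foldl_cons]
    by_cases h : PySem.List.pyGetD arr a 0 > PySem.List.pyGetD arr (a-1) 0
    · simp only [if_pos h]
      rw [ih (r + (i2 - a + 1)) (k + 1), ih (0 + (i2 - a + 1)) (0 + 1)]
      simp only [Prod.mk.injEq]
      constructor <;> ring
    · simp only [if_neg h]
      exact ih r k

-- Main invariant: A's fold over the range [a, i2] relates to B's contribution fold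
-- and the 0/1 counting sum over the same range.
lemma mainInv (arr : List Int) (i2 peek : Int) :
    ∀ (n : Nat) (a : Int), a = i2 + 1 - (n : Int) →
    ∀ (np res asc : Int),
      (PySem.List.pyRange a (i2+1) 1).foldl
        (fun (st : Int × Int × Int) i =>
          ((if PySem.List.pyGetD arr i 0 = peek then st.1 + 1 else st.1),
           st.2.1 + (if PySem.List.pyGetD arr i 0 > PySem.List.pyGetD arr (i-1) 0
                     then st.2.2 + 1 else st.2.2),
           (if PySem.List.pyGetD arr i 0 > PySem.List.pyGetD arr (i-1) 0
            then st.2.2 + 1 else st.2.2))) (np, res, 1 + asc)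
      = (np + ((PySem.List.pyRange a (i2+1) 1).map
            (fun j => if PySem.List.pyGetD arr j 0 = peek then (1 : Int) else 0)).sum,
         res + (1 + asc) * (n : Int)
             + ((PySem.List.pyRange a (i2+1) 1).foldl
                 (fun (st : Int × Int) j =>
                   if PySem.List.pyGetD arr j 0 > PySem.List.pyGetD arr (j-1) 0
                   then (st.1 + (i2 - j + 1), st.2 + 1) else st) (0, 0)).1,
         1 + asc + ((PySem.List.pyRange a (i2+1) 1).foldl
                 (fun (st : Int × Int) j =>
                   if PySem.List.pyGetD arr j 0 > PySem.List.pyGetD arr (j-1) 0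
                   then (st.1 + (i2 - j + 1), st.2 + 1) else st) (0, 0)).2) := by
  intro n
  induction n with
  | zero =>
    intro a ha np res asc
    have hnil : PySem.List.pyRange a (i2+1) 1 = [] :=
      PySem.List.pyRange_one_eq_nil (by omega)
    simp [hnil]
  | succ m ih =>
    intro a ha np res asc
    have hm : i2 - a + 1 = ((m : Int) + 1) := by push_cast at ha ⊢; omega
    have hcons : PySem.List.pyRange a (i2+1) 1 = a :: PySem.List.pyRange (a+1) (i2+1) 1 :=
      PySem.List.pyRange_one_cons (by push_cast at ha; omega)
    rw [hcons]
    simp only [List.foldl_cons, List.map_cons, List.sum_cons]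
    have ha' : a + 1 = i2 + 1 - ((m : Nat) : Int) := by push_cast at ha ⊢; omega
    by_cases hasc : PySem.List.pyGetD arr a 0 > PySem.List.pyGetD arr (a-1) 0
    · simp only [if_pos hasc]
      rw [shiftB arr i2 _ (0 + (i2 - a + 1)) (0 + 1),
          show (1:Int) + asc + 1 = 1 + (asc + 1) from by ring]
      by_cases hp : PySem.List.pyGetD arr a 0 = peek
      · simp only [if_pos hp]
        rw [ih (a+1) ha']
        generalize (List.foldl (fun (st : Int × Int) j =>
            if PySem.List.pyGetD arr j 0 > PySem.List.pyGetD arr (j-1) 0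
            then (st.1 + (i2 - j + 1), st.2 + 1) else st) ((0:Int),(0:Int))
            (PySem.List.pyRange (a+1) (i2+1) 1)) = Y
        simp only [Prod.mk.injEq]
        push_cast
        rw [show ((m : Nat) : Int) = i2 - a from by push_cast at hm; omega]
        and_intros <;> (first | trivial | ring)
      · simp only [if_neg hp]
        rw [ih (a+1) ha']
        generalize (List.foldl (fun (st : Int × Int) j =>
            if PySem.List.pyGetD arr j 0 > PySem.List.pyGetD arr (j-1) 0
            then (st.1 + (i2 - j + 1), st.2 + 1) else st) ((0:Int),(0:Int))
            (PySem.List.pyRange (a+1) (i2+1) 1)) = Y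
        simp only [Prod.mk.injEq]
        push_cast
        rw [show ((m : Nat) : Int) = i2 - a from by push_cast at hm; omega]
        and_intros <;> (first | trivial | ring)
    · simp only [if_neg hasc]
      by_cases hp : PySem.List.pyGetD arr a 0 = peek
      · simp only [if_pos hp]
        rw [ih (a+1) ha']
        generalize (List.foldl (fun (st : Int × Int) j =>
            if PySem.List.pyGetD arr j 0 > PySem.List.pyGetD arr (j-1) 0
            then (st.1 + (i2 - j + 1), st.2 + 1) else st) ((0:Int),(0:Int))
            (PySem.List.pyRange (a+1) (i2+1) 1)) = Y
        simp only [Prod.mk.injEq]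
        push_cast
        rw [show ((m : Nat) : Int) = i2 - a from by push_cast at hm; omega]
        and_intros <;> (first | trivial | ring)
      · simp only [if_neg hp]
        rw [ih (a+1) ha']
        generalize (List.foldl (fun (st : Int × Int) j =>
            if PySem.List.pyGetD arr j 0 > PySem.List.pyGetD arr (j-1) 0
            then (st.1 + (i2 - j + 1), st.2 + 1) else st) ((0:Int),(0:Int))
            (PySem.List.pyRange (a+1) (i2+1) 1)) = Y
        simp only [Prod.mk.injEq]
        push_cast
        rw [show ((m : Nat) : Int) = i2 - a from by push_cast at hm; omega]
        and_intros <;> (first | trivial | ring)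

-- ===== VERDICT (by name: the statement is the Claim_ definition above) =====
theorem cal_asc_spec : Claim_equal_cal_asc := by
  intro arr i1 i2 max_value _ _
  unfold Spec_cal_asc
  by_cases h : i1 > i2
  · simp [cal_asc, cal_asc_alt, h]
  · have hle : i1 ≤ i2 := by omega
    have hn : ((i2 - i1).toNat : Int) = i2 - i1 := by omega
    have ha : i1 + 1 = i2 + 1 - (((i2 - i1).toNat : Nat) : Int) := by omega
    have H := mainInv arr i2 (PySem.List.pyGetD arr i2 0) (i2 - i1).toNat (i1+1) ha 0 1 0
    rw [hn] at H
    simp only [cal_asc, cal_asc_alt, if_neg h]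
    rw [show ((0:Int), (1:Int), (1:Int)) = ((0:Int), (1:Int), (1:Int) + 0) from by norm_num,
        H, shiftB arr i2 _ (i2 - i1 + 1) 0]
    generalize (List.foldl (fun (st : Int × Int) j =>
        if PySem.List.pyGetD arr j 0 > PySem.List.pyGetD arr (j-1) 0
        then (st.1 + (i2 - j + 1), st.2 + 1) else st) ((0:Int),(0:Int))
        (PySem.List.pyRange (i1+1) (i2+1) 1)) = Y
    generalize ((List.map (fun j => if PySem.List.pyGetD arr j 0 = PySem.List.pyGetD arr i2 0 then (1:Int) else 0)
        (PySem.List.pyRange (i1+1) (i2+1) 1)).sum) = C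
    obtain ⟨Y1, Y2⟩ := Y
    dsimp only
    split_ifs with h1 h2 h2 <;> (try ring)
    all_goals (exfalso; omega)
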